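-- pv_equiv track=rewrite | github.com/js0221/codingtest | algorithm/전염병.py | solution
-- ===== SOURCE A (Python) =====
-- from collections import deque
--
-- def solution(m, n, infests, vaccinateds):
--     ways = [(1, 0), (0, 1), (-1, 0), (0, -1)]
--     board = [[0] * n for _ in range(m)]
--
--     # 감염 1, 백신 -1, 없음 0
--     for i, j in vaccinateds:
--         board[i - 1][j - 1] = -1
--     for i, j in infests:
--         board[i - 1][j - 1] = 1
--
--     # 탐색 전 : 어느 직원이든지 감염이나, 백신 상태일때
--     for i in board:
--         if 0 in i:
--             break
--     else:
--         return 0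
--
--     # 탐색
--     queue = [(x - 1, y - 1) for x, y in infests]
--     queue = deque(queue)
--     while queue:
--         x, y = queue.popleft()
--
--         for wx, wy in ways:
--             new_x, new_y = x + wx, y + wy
--             if 0 <= new_x < m and 0 <= new_y < n and board[x][y] >= 1 and board[new_x][new_y] == 0:
--
--                 board[new_x][new_y] = board[x][y] + 1
--                 queue.append((new_x, new_y))
--
--     # 탐색 후 : 빈칸이 있을 때
--     for i in board:
--         if 0 in i:
--             return -1
--
--     return max(map(max, board)) - 1
-- ===== SOURCE B (Python) =====
-- def solution(m, n, infests, vaccinateds):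
--     # level-synchronous BFS: frontier list + depth counter, no per-cell distances
--     board = [[0] * n for _ in range(m)]
--     for i, j in vaccinateds:
--         board[i - 1][j - 1] = -1
--     for i, j in infests:
--         board[i - 1][j - 1] = 1
--     if all(0 not in row for row in board):
--         return 0
--     frontier = [(x - 1, y - 1) for x, y in infests]
--     depth = 0
--     while True:
--         nxt = []
--         for x, y in frontier:
--             for dx, dy in ((1, 0), (0, 1), (-1, 0), (0, -1)):
--                 nx, ny = x + dx, y + dy
--                 if 0 <= nx < m and 0 <= ny < n and board[nx][ny] == 0:
--                     board[nx][ny] = 1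
--                     nxt.append((nx, ny))
--         if not nxt:
--             break
--         frontier = nxt
--         depth += 1
--     if any(0 in row for row in board):
--         return -1
--     return depth
-- ===== Notes on version B (the rewrite author's own statement) =====
-- stated objective: alternative
-- what changed: Replaces the FIFO-queue BFS that stores a per-cell distance label in the grid and finishes with a max-scan over all cells by a level-synchronous BFS that keeps only a frontier list and a depth counter (cells are merely marked visited), so the answer is the number of nonempty rounds and no final max pass exists.
import Mathlib
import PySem

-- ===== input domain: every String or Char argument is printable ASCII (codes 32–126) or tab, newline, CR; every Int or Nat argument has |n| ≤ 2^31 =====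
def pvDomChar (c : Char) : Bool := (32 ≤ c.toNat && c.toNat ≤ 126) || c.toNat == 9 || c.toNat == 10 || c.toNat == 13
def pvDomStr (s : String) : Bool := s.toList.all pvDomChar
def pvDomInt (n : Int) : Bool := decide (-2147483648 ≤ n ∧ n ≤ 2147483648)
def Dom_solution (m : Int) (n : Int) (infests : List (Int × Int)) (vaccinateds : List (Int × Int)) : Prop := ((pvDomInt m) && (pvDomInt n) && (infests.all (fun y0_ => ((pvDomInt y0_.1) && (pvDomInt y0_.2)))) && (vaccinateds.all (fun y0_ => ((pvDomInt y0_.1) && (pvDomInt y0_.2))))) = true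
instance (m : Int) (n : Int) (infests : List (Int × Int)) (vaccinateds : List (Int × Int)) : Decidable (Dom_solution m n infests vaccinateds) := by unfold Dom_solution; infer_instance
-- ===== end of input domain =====

-- B replaces A's FIFO BFS with per-cell distance labels and a final max-scan by a
-- level-synchronous frontier BFS with a depth counter (objective: alternative, same cost).

-- Shared board primitives (the Python list-of-lists grid both versions build the same way).
def pvWays : List (Int × Int) := [(1, 0), (0, 1), (-1, 0), (0, -1)]

def pvMkBoard (m n : Int) : List (List Int) :=
  List.replicate m.toNat (List.replicate n.toNat 0)

-- board[x][y] with Python's negative-index wraparound; exact whenever Python's indexing succeeds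
-- (a genuinely out-of-range access raises IndexError in Python: excluded by Pre_; default 1 unused there)
def pvGetCell (b : List (List Int)) (x y : Int) : Int :=
  let r := b.getD (if x < 0 then x + b.length else x).toNat []
  r.getD (if y < 0 then y + r.length else y).toNat 1

def pvSetCell (b : List (List Int)) (x y : Int) (v : Int) : List (List Int) :=
  let r := b.getD (if x < 0 then x + b.length else x).toNat []
  b.set (if x < 0 then x + b.length else x).toNat
    (r.set (if y < 0 then y + r.length else y).toNat v)

def pvPlace (b : List (List Int)) (ps : List (Int × Int)) (v : Int) : List (List Int) :=
  ps.foldl (fun b p => pvSetCell b (p.1 - 1) (p.2 - 1) v) b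

def pvHasZero (b : List (List Int)) : Bool :=
  b.any (fun r => r.any (fun z => z == 0))

def pvZeros (b : List (List Int)) : Nat :=
  (b.map (fun r => r.countP (fun z => z == 0))).sum

-- termination bookkeeping: setting a genuine 0 cell to a nonzero value removes one zero
theorem pv_countP_set (p : Int → Bool) (l : List Int) (i : Nat) (v : Int)
    (h : i < l.length) (h0 : p (l.getD i 1) = true) (hv : p v = false) :
    (l.set i v).countP p + 1 = l.countP p := by
  induction l generalizing i with
  | nil => simp at h
  | cons a t ih =>
    cases i with
    | zero => simp_all
    | succ j =>
      simp only [List.set_cons_succ, List.countP_cons]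
      have := ih j (by simpa using h) (by simpa using h0)
      omega

theorem pvZeros_set_nat (b : List (List Int)) (i j : Nat) (v : Int)
    (hi : i < b.length) (hj : j < (b.getD i []).length)
    (h0 : (b.getD i []).getD j 1 = 0) (hv : v ≠ 0) :
    pvZeros (b.set i ((b.getD i []).set j v)) + 1 = pvZeros b := by
  induction b generalizing i with
  | nil => simp at hi
  | cons r t ih =>
    cases i with
    | zero =>
      simp only [List.getD_cons_zero] at hj h0
      have hc := pv_countP_set (fun z => z == 0) r j v hj
        (by simpa [List.getD_eq_getElem?_getD] using h0) (by simp [hv])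
      simp only [List.getD_cons_zero, List.set_cons_zero, pvZeros, List.map_cons, List.sum_cons]
      omega
    | succ k =>
      simp only [List.getD_cons_succ] at hj h0
      have := ih k (by simpa using hi) hj h0
      simp only [List.getD_cons_succ, List.set_cons_succ, pvZeros, List.map_cons, List.sum_cons]
      simp only [pvZeros] at this
      omega

theorem pvZeros_set (b : List (List Int)) (x y : Int) (v : Int)
    (h0 : pvGetCell b x y = 0) (hv : v ≠ 0) :
    pvZeros (pvSetCell b x y v) + 1 = pvZeros b := by
  simp only [pvGetCell] at h0
  simp only [pvSetCell]
  set xi := (if x < 0 then x + (b.length : Int) else x).toNat with hxi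
  set yi := (if y < 0 then y + ((b.getD xi []).length : Int) else y).toNat with hyi
  have hx : xi < b.length := by
    by_contra hx
    have h1 : b.getD xi [] = [] := List.getD_eq_default _ _ (by omega)
    rw [h1] at h0
    simp at h0
  have hy : yi < (b.getD xi []).length := by
    by_contra hy
    have h1 : (b.getD xi []).getD yi 1 = 1 := List.getD_eq_default _ _ (by omega)
    rw [h1] at h0
    simp at h0
  exact pvZeros_set_nat b xi yi v hx hy h0 hv

-- one neighbour step of A's BFS: conditionally infect (x,y)+w with distance board[x][y]+1 and record it
def wayStepA (m n x y : Int) (s : List (List Int) × List (Int × Int)) (w : Int × Int) :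
    List (List Int) × List (Int × Int) :=
  if 0 ≤ x + w.1 ∧ x + w.1 < m ∧ 0 ≤ y + w.2 ∧ y + w.2 < n
      ∧ 1 ≤ pvGetCell s.1 x y ∧ pvGetCell s.1 (x + w.1) (y + w.2) = 0 then
    (pvSetCell s.1 (x + w.1) (y + w.2) (pvGetCell s.1 x y + 1), s.2 ++ [(x + w.1, y + w.2)])
  else s

-- one neighbour step of B's BFS: conditionally mark (x,y)+w visited (1) and record it
def wayStepB (m n x y : Int) (s : List (List Int) × List (Int × Int)) (w : Int × Int) :
    List (List Int) × List (Int × Int) :=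
  if 0 ≤ x + w.1 ∧ x + w.1 < m ∧ 0 ≤ y + w.2 ∧ y + w.2 < n
      ∧ pvGetCell s.1 (x + w.1) (y + w.2) = 0 then
    (pvSetCell s.1 (x + w.1) (y + w.2) 1, s.2 ++ [(x + w.1, y + w.2)])
  else s

-- every recorded neighbour flips one genuine 0 cell, for either step function
theorem zeros_fold {α : Type} (f : (List (List Int) × List (Int × Int)) → α →
      (List (List Int) × List (Int × Int)))
    (hf : ∀ s w, pvZeros (f s w).1 + (f s w).2.length = pvZeros s.1 + s.2.length)
    (ws : List α) : ∀ s, pvZeros (List.foldl f s ws).1 + (List.foldl f s ws).2.length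
      = pvZeros s.1 + s.2.length := by
  induction ws with
  | nil => intro s; simp
  | cons w ws ih => intro s; simp only [List.foldl_cons]; rw [ih (f s w)]; exact hf s w

theorem wayStepA_zeros (m n x y : Int) (s : List (List Int) × List (Int × Int)) (w : Int × Int) :
    pvZeros (wayStepA m n x y s w).1 + (wayStepA m n x y s w).2.length
      = pvZeros s.1 + s.2.length := by
  unfold wayStepA
  split
  · rename_i h
    have := pvZeros_set s.1 (x + w.1) (y + w.2) (pvGetCell s.1 x y + 1) h.2.2.2.2.2 (by omega)
    simp only [List.length_append, List.length_cons, List.length_nil]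
    omega
  · rfl

theorem wayStepB_zeros (m n x y : Int) (s : List (List Int) × List (Int × Int)) (w : Int × Int) :
    pvZeros (wayStepB m n x y s w).1 + (wayStepB m n x y s w).2.length
      = pvZeros s.1 + s.2.length := by
  unfold wayStepB
  split
  · rename_i h
    have := pvZeros_set s.1 (x + w.1) (y + w.2) 1 h.2.2.2.2 (by omega)
    simp only [List.length_append, List.length_cons, List.length_nil]
    omega
  · rfl

theorem stepA_zeros (m n x y : Int) (b : List (List Int)) :
    pvZeros (List.foldl (wayStepA m n x y) (b, []) pvWays).1
      + (List.foldl (wayStepA m n x y) (b, []) pvWays).2.length = pvZeros b := by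
  simpa using zeros_fold (wayStepA m n x y) (wayStepA_zeros m n x y) pvWays (b, [])

-- ===== PORT A ===== (FIFO-queue BFS; each popped cell writes distance board[x][y]+1 into its fresh neighbours)
def loopA (m n : Int) (b : List (List Int)) (q : List (Int × Int)) : List (List Int) :=
  match q with
  | [] => b
  | c :: rest =>
    let s := List.foldl (wayStepA m n c.1 c.2) (b, []) pvWays
    loopA m n s.1 (rest ++ s.2)
termination_by (pvZeros b, q.length)
decreasing_by
  have h := stepA_zeros m n c.1 c.2 b
  rcases Nat.eq_zero_or_pos (List.foldl (wayStepA m n c.1 c.2) (b, []) pvWays).2.length with h0 | h0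
  · have : pvZeros (List.foldl (wayStepA m n c.1 c.2) (b, []) pvWays).1 = pvZeros b := by omega
    rw [this]
    exact Prod.Lex.right _ (by simp [h0])
  · exact Prod.Lex.left _ _ (by omega)

-- Python's max over a nonempty list (never called on [] in A: rows are nonempty when reached)
def listMax (l : List Int) : Int :=
  match l with
  | [] => 0
  | a :: t => t.foldl max a

def solution (m : Int) (n : Int) (infests : List (Int × Int)) (vaccinateds : List (Int × Int)) : Int :=
  let b0 := pvPlace (pvPlace (pvMkBoard m n) vaccinateds (-1)) infests 1
  if pvHasZero b0 then
    let bf := loopA m n b0 (infests.map (fun p => (p.1 - 1, p.2 - 1)))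
    if pvHasZero bf then -1 else listMax (bf.map listMax) - 1
  else 0

-- ===== PORT B ===== (level-synchronous BFS: expand the whole frontier, count nonempty rounds)
theorem cellStepB_zeros (m n : Int) (s : List (List Int) × List (Int × Int)) (c : Int × Int) :
    pvZeros (List.foldl (wayStepB m n c.1 c.2) s pvWays).1
      + (List.foldl (wayStepB m n c.1 c.2) s pvWays).2.length
      = pvZeros s.1 + s.2.length :=
  zeros_fold (wayStepB m n c.1 c.2) (wayStepB_zeros m n c.1 c.2) pvWays s

-- expand a whole frontier: B's inner "for x, y in frontier: for dx, dy in ways: …" round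
def expandB (m n : Int) (b : List (List Int)) (F : List (Int × Int)) :
    List (List Int) × List (Int × Int) :=
  List.foldl (fun s c => List.foldl (wayStepB m n c.1 c.2) s pvWays) (b, []) F

theorem expandB_zeros (m n : Int) (b : List (List Int)) (F : List (Int × Int)) :
    pvZeros (expandB m n b F).1 + (expandB m n b F).2.length = pvZeros b := by
  simpa [expandB] using zeros_fold (fun s c => List.foldl (wayStepB m n c.1 c.2) s pvWays)
    (fun s c => cellStepB_zeros m n s c) F (b, [])

def loopB (m n : Int) (b : List (List Int)) (F : List (Int × Int)) (d : Int) :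
    List (List Int) × Int :=
  let s := expandB m n b F
  if s.2 = [] then (s.1, d) else loopB m n s.1 s.2 (d + 1)
termination_by pvZeros b
decreasing_by
  rename_i hne
  have h := expandB_zeros m n b F
  have hlen : (expandB m n b F).2.length ≠ 0 :=
    fun h' => hne (List.eq_nil_of_length_eq_zero h')
  omega

def solution_alt (m : Int) (n : Int) (infests : List (Int × Int)) (vaccinateds : List (Int × Int)) : Int :=
  let b0 := pvPlace (pvPlace (pvMkBoard m n) vaccinateds (-1)) infests 1
  if b0.all (fun r => !(r.any (fun z => z == 0))) then 0
  else
    let s := loopB m n b0 (infests.map (fun p => (p.1 - 1, p.2 - 1))) 0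
    if pvHasZero s.1 then -1 else s.2

-- ===== PRECONDITION & SPEC =====
-- Pre_ admits exactly the coordinates Python indexes without raising: board[i-1][j-1] succeeds
-- (with negative-index wraparound) iff -m ≤ i-1 ≤ m-1 and -n ≤ j-1 ≤ n-1; outside, A raises IndexError.
def Pre_solution (m : Int) (n : Int) (infests : List (Int × Int)) (vaccinateds : List (Int × Int)) : Prop :=
  (∀ p ∈ infests, 1 - m ≤ p.1 ∧ p.1 ≤ m ∧ 1 - n ≤ p.2 ∧ p.2 ≤ n) ∧
  (∀ p ∈ vaccinateds, 1 - m ≤ p.1 ∧ p.1 ≤ m ∧ 1 - n ≤ p.2 ∧ p.2 ≤ n)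
instance (m : Int) (n : Int) (infests : List (Int × Int)) (vaccinateds : List (Int × Int)) : Decidable (Pre_solution m n infests vaccinateds) := by unfold Pre_solution; infer_instance

def pvWitness_solution : Int × Int × (List (Int × Int)) × (List (Int × Int)) :=
  (2, 2, [(1, 1)], [(2, 2)])

def Spec_solution (m : Int) (n : Int) (infests : List (Int × Int)) (vaccinateds : List (Int × Int)) (out : Int) : Prop := out = solution_alt m n infests vaccinateds
instance (m : Int) (n : Int) (infests : List (Int × Int)) (vaccinateds : List (Int × Int)) (out : Int) : Decidable (Spec_solution m n infests vaccinateds out) := by unfold Spec_solution; infer_instance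

-- ===== CLAIM (what is proved, stated in full; the proofs are below) =====
def Claim_equal_solution : Prop := ∀ (m : Int) (n : Int) (infests : List (Int × Int)) (vaccinateds : List (Int × Int)), Dom_solution m n infests vaccinateds → Pre_solution m n infests vaccinateds → Spec_solution m n infests vaccinateds (solution m n infests vaccinateds)

-- ===== LEMMAS AND PROOFS =====

def InR (m n : Int) (c : Int × Int) : Prop :=
  0 ≤ c.1 ∧ c.1 < m ∧ 0 ≤ c.2 ∧ c.2 < n

def dimsP (m n : Int) (b : List (List Int)) : Prop :=
  b.length = m.toNat ∧ ∀ r ∈ b, r.length = n.toNat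

def ZEq (m n : Int) (bA bB : List (List Int)) : Prop :=
  ∀ c, InR m n c → (pvGetCell bA c.1 c.2 = 0 ↔ pvGetCell bB c.1 c.2 = 0)

theorem pv_getD_set_self {α : Type} (l : List α) (i : Nat) (a d : α) (h : i < l.length) :
    (l.set i a).getD i d = a := by
  rw [List.getD_eq_getElem?_getD, List.getElem?_set_eq_of_lt _ h, Option.getD_some]

theorem pv_getD_set_ne {α : Type} (l : List α) (i j : Nat) (a d : α) (h : i ≠ j) :
    (l.set i a).getD j d = l.getD j d := by
  rw [List.getD_eq_getElem?_getD, List.getElem?_set_ne h, ← List.getD_eq_getElem?_getD]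

theorem getCell_nn (b : List (List Int)) (x y : Int) (hx : 0 ≤ x) (hy : 0 ≤ y) :
    pvGetCell b x y = (b.getD x.toNat []).getD y.toNat 1 := by
  simp only [pvGetCell]
  rw [if_neg (by omega), if_neg (by omega)]

theorem setCell_nn (b : List (List Int)) (x y v : Int) (hx : 0 ≤ x) (hy : 0 ≤ y) :
    pvSetCell b x y v = b.set x.toNat ((b.getD x.toNat []).set y.toNat v) := by
  simp only [pvSetCell]
  rw [if_neg (by omega), if_neg (by omega)]

theorem dims_set (m n : Int) (b : List (List Int)) (x y v : Int) (h : dimsP m n b) :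
    dimsP m n (pvSetCell b x y v) := by
  simp only [pvSetCell]
  set xi := (if x < 0 then x + (b.length : Int) else x).toNat
  set yi := (if y < 0 then y + ((b.getD xi []).length : Int) else y).toNat
  by_cases hx : xi < b.length
  · obtain ⟨h1, h2⟩ := h
    refine ⟨by simpa using h1, ?_⟩
    intro r hr
    rcases List.mem_or_eq_of_mem_set hr with h' | h'
    · exact h2 r h'
    · subst h'
      rw [List.length_set]
      exact h2 _ (by rw [List.getD_eq_getElem _ _ hx]; exact List.getElem_mem hx)
  · rwa [List.set_eq_of_length_le (by omega)]

theorem getCell_mkBoard (m n : Int) (c : Int × Int) (h : InR m n c) :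
    pvGetCell (pvMkBoard m n) c.1 c.2 = 0 := by
  obtain ⟨h1, h2, h3, h4⟩ := h
  have hx : c.1.toNat < m.toNat := by omega
  have hy : c.2.toNat < n.toNat := by omega
  have hx' : c.1.toNat < (List.replicate m.toNat (List.replicate n.toNat (0 : Int))).length := by
    rw [List.length_replicate]; exact hx
  have hy' : c.2.toNat < (List.replicate n.toNat (0 : Int)).length := by
    rw [List.length_replicate]; exact hy
  rw [getCell_nn _ _ _ h1 h3, pvMkBoard, List.getD_eq_getElem _ _ hx', List.getElem_replicate,
      List.getD_eq_getElem _ _ hy', List.getElem_replicate]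

theorem dims_mkBoard (m n : Int) : dimsP m n (pvMkBoard m n) := by
  constructor
  · simp [pvMkBoard]
  · intro r hr
    rw [pvMkBoard] at hr
    rw [List.eq_of_mem_replicate hr]
    simp

theorem getCell_set_self (m n : Int) (b : List (List Int)) (x y v : Int)
    (hd : dimsP m n b) (h : InR m n (x, y)) :
    pvGetCell (pvSetCell b x y v) x y = v := by
  obtain ⟨h1, h2, h3, h4⟩ := h
  replace h1 : 0 ≤ x := h1
  replace h2 : x < m := h2
  replace h3 : 0 ≤ y := h3
  replace h4 : y < n := h4
  have hx : x.toNat < b.length := by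
    have := hd.1; omega
  have hrow : (b.getD x.toNat []).length = n.toNat := hd.2 _ (by
    rw [List.getD_eq_getElem _ _ hx]; exact List.getElem_mem hx)
  have hy : y.toNat < (b.getD x.toNat []).length := by rw [hrow]; omega
  rw [setCell_nn _ _ _ _ h1 h3, getCell_nn _ _ _ h1 h3,
      pv_getD_set_self _ _ _ _ hx, pv_getD_set_self _ _ _ _ hy]

theorem getCell_set_ne (b : List (List Int)) (x y v cx cy : Int)
    (hx : 0 ≤ x) (hy : 0 ≤ y) (hcx : 0 ≤ cx) (hcy : 0 ≤ cy)
    (hne : (x, y) ≠ (cx, cy)) :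
    pvGetCell (pvSetCell b x y v) cx cy = pvGetCell b cx cy := by
  rw [setCell_nn _ _ _ _ hx hy, getCell_nn _ _ _ hcx hcy, getCell_nn _ _ _ hcx hcy]
  by_cases hxx : x.toNat = cx.toNat
  · have hxe : x = cx := by omega
    have hyy : y.toNat ≠ cy.toNat := by
      have : y ≠ cy := fun h => hne (by rw [hxe, h])
      omega
    by_cases hlt : x.toNat < b.length
    · rw [hxe, pv_getD_set_self _ _ _ _ (by rw [← hxe]; exact hlt),
          pv_getD_set_ne _ _ _ _ _ hyy]
    · rw [List.set_eq_of_length_le (by omega)]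
  · rw [pv_getD_set_ne _ _ _ _ _ hxx]

theorem getCell_set_or (b : List (List Int)) (x y v cx cy : Int)
    (hx : 0 ≤ x) (hy : 0 ≤ y) (hcx : 0 ≤ cx) (hcy : 0 ≤ cy) :
    pvGetCell (pvSetCell b x y v) cx cy = v ∨
      pvGetCell (pvSetCell b x y v) cx cy = pvGetCell b cx cy := by
  by_cases he : (x, y) = (cx, cy)
  · obtain ⟨he1, he2⟩ := Prod.mk.injEq .. ▸ he
    subst he1; subst he2
    rw [setCell_nn _ _ _ _ hx hy, getCell_nn _ _ _ hx hy, getCell_nn _ _ _ hx hy]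
    by_cases hlt : x.toNat < b.length
    · by_cases hyl : y.toNat < (b.getD x.toNat []).length
      · left
        rw [pv_getD_set_self _ _ _ _ hlt, pv_getD_set_self _ _ _ _ hyl]
      · right
        rw [pv_getD_set_self _ _ _ _ hlt, List.set_eq_of_length_le (by omega)]
    · right
      rw [List.set_eq_of_length_le (by omega)]
  · right
    exact getCell_set_ne b x y v cx cy hx hy hcx hcy he

-- canonical (wrapped) coordinates: a possibly-negative Python index and its canonical cell agree
theorem getCell_canon (m n : Int) (b : List (List Int)) (hd : dimsP m n b) (x y : Int)
    (hm : 0 < m) (hn : 0 < n) (hx1 : -m ≤ x) (hx2 : x < m) (hy1 : -n ≤ y) (hy2 : y < n) :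
    pvGetCell b x y
      = pvGetCell b (if x < 0 then x + m else x) (if y < 0 then y + n else y) := by
  have hbl : (b.length : Int) = m := by have := hd.1; omega
  have hcx0 : 0 ≤ (if x < 0 then x + m else x) := by split <;> omega
  have hcx2 : (if x < 0 then x + m else x) < m := by split <;> omega
  have hxi : (if x < 0 then x + (b.length : Int) else x) = (if x < 0 then x + m else x) := by
    rw [hbl]
  have hcl : (if x < 0 then x + m else x).toNat < b.length := by
    have := hd.1; omega
  have hrl : (b.getD (if x < 0 then x + m else x).toNat []).length = n.toNat := hd.2 _ (by
    rw [List.getD_eq_getElem _ _ hcl]; exact List.getElem_mem hcl)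
  have hyi : (if y < 0 then
        y + ((b.getD (if x < 0 then x + m else x).toNat []).length : Int) else y)
      = (if y < 0 then y + n else y) := by
    rw [hrl]; split <;> omega
  rw [getCell_nn _ _ _ hcx0 (by split <;> omega)]
  simp only [pvGetCell]
  rw [hxi, hyi]

theorem setCell_canon (m n : Int) (b : List (List Int)) (hd : dimsP m n b) (x y v : Int)
    (hm : 0 < m) (hn : 0 < n) (hx1 : -m ≤ x) (hx2 : x < m) (hy1 : -n ≤ y) (hy2 : y < n) :
    pvSetCell b x y v
      = pvSetCell b (if x < 0 then x + m else x) (if y < 0 then y + n else y) v := by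
  have hbl : (b.length : Int) = m := by have := hd.1; omega
  have hcx0 : 0 ≤ (if x < 0 then x + m else x) := by split <;> omega
  have hxi : (if x < 0 then x + (b.length : Int) else x) = (if x < 0 then x + m else x) := by
    rw [hbl]
  have hcl : (if x < 0 then x + m else x).toNat < b.length := by
    have := hd.1; omega
  have hrl : (b.getD (if x < 0 then x + m else x).toNat []).length = n.toNat := hd.2 _ (by
    rw [List.getD_eq_getElem _ _ hcl]; exact List.getElem_mem hcl)
  have hyi : (if y < 0 then
        y + ((b.getD (if x < 0 then x + m else x).toNat []).length : Int) else y)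
      = (if y < 0 then y + n else y) := by
    rw [hrl]; split <;> omega
  rw [setCell_nn _ _ _ _ hcx0 (by split <;> omega)]
  simp only [pvSetCell]
  rw [hxi, hyi]

-- the canonical cell a 1-based (possibly wrapping) Python coordinate pair lands on
def canonP (m n : Int) (p : Int × Int) : Int × Int :=
  (if p.1 - 1 < 0 then p.1 - 1 + m else p.1 - 1, if p.2 - 1 < 0 then p.2 - 1 + n else p.2 - 1)

theorem canonP_InR (m n : Int) (p : Int × Int) (hm : 0 < m) (hn : 0 < n)
    (h : 1 - m ≤ p.1 ∧ p.1 ≤ m ∧ 1 - n ≤ p.2 ∧ p.2 ≤ n) : InR m n (canonP m n p) := by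
  rw [canonP, InR]
  constructor
  · dsimp only; split <;> omega
  refine ⟨?_, ?_, ?_⟩ <;> dsimp only <;> split <;> omega

-- placement on canonical cells (proof-side normal form of pvPlace)
def placeC (b : List (List Int)) (cs : List (Int × Int)) (v : Int) : List (List Int) :=
  cs.foldl (fun b c => pvSetCell b c.1 c.2 v) b

theorem dims_placeC (m n : Int) (b : List (List Int)) (cs : List (Int × Int)) (v : Int)
    (h : dimsP m n b) : dimsP m n (placeC b cs v) := by
  induction cs generalizing b with
  | nil => simpa [placeC]
  | cons c t ih =>
    rw [placeC, List.foldl_cons]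
    exact ih _ (dims_set m n b _ _ v h)

theorem place_canon (m n : Int) (v : Int) (hm : 0 < m) (hn : 0 < n) :
    ∀ (ps : List (Int × Int)) (b : List (List Int)), dimsP m n b →
    (∀ p ∈ ps, 1 - m ≤ p.1 ∧ p.1 ≤ m ∧ 1 - n ≤ p.2 ∧ p.2 ≤ n) →
    pvPlace b ps v = placeC b (ps.map (canonP m n)) v := by
  intro ps
  induction ps with
  | nil => intro b _ _; rfl
  | cons p t ih =>
    intro b hb hps
    have hp := hps p (by simp)
    rw [pvPlace, List.foldl_cons, ← pvPlace, List.map_cons, placeC, List.foldl_cons, ← placeC]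
    rw [setCell_canon m n b hb (p.1 - 1) (p.2 - 1) v hm hn
      (by omega) (by omega) (by omega) (by omega)]
    exact ih _ (dims_set m n b _ _ v hb) (fun q hq => hps q (by simp [hq]))

theorem placeC_or (b : List (List Int)) (cs : List (Int × Int)) (v cx cy : Int)
    (hcs : ∀ c ∈ cs, 0 ≤ c.1 ∧ 0 ≤ c.2) (hcx : 0 ≤ cx) (hcy : 0 ≤ cy) :
    pvGetCell (placeC b cs v) cx cy = v ∨
      pvGetCell (placeC b cs v) cx cy = pvGetCell b cx cy := by
  induction cs generalizing b with
  | nil => right; simp [placeC]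
  | cons c t ih =>
    rw [placeC, List.foldl_cons, ← placeC]
    have hc := hcs c (by simp)
    rcases ih (pvSetCell b c.1 c.2 v) (fun q hq => hcs q (by simp [hq])) with h | h
    · left; exact h
    · rcases getCell_set_or b c.1 c.2 v cx cy hc.1 hc.2 hcx hcy with h2 | h2
      · left; rw [h, h2]
      · right; rw [h, h2]

theorem placeC_mem (m n : Int) (b : List (List Int)) (cs : List (Int × Int)) (v : Int)
    (c : Int × Int) (hd : dimsP m n b) (hcs : ∀ q ∈ cs, InR m n q) (hc : c ∈ cs) :
    pvGetCell (placeC b cs v) c.1 c.2 = v := by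
  induction cs generalizing b with
  | nil => simp at hc
  | cons q t ih =>
    rw [placeC, List.foldl_cons, ← placeC]
    rcases List.mem_cons.1 hc with he | ht
    · subst he
      have hq := hcs c (by simp)
      rcases placeC_or (pvSetCell b c.1 c.2 v) t v c.1 c.2
        (fun q hq' => ⟨(hcs q (by simp [hq'])).1, (hcs q (by simp [hq'])).2.2.1⟩)
        hq.1 hq.2.2.1 with h | h
      · exact h
      · rw [h]
        exact getCell_set_self m n b _ _ v hd ⟨hq.1, hq.2.1, hq.2.2.1, hq.2.2.2⟩
    · exact ih _ (dims_set m n b _ _ v hd) (fun q hq => hcs q (by simp [hq])) ht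

theorem dims_place (m n : Int) (b : List (List Int)) (ps : List (Int × Int)) (v : Int)
    (h : dimsP m n b) : dimsP m n (pvPlace b ps v) := by
  induction ps generalizing b with
  | nil => simpa [pvPlace]
  | cons p t ih =>
    rw [pvPlace, List.foldl_cons]
    exact ih _ (dims_set m n b _ _ v h)

theorem hasZero_iff (m n : Int) (b : List (List Int)) (hd : dimsP m n b) :
    pvHasZero b = true ↔ ∃ c, InR m n c ∧ pvGetCell b c.1 c.2 = 0 := by
  rw [pvHasZero, List.any_eq_true]
  constructor
  · rintro ⟨r, hr, hz⟩
    rw [List.any_eq_true] at hz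
    obtain ⟨z, hzr, hz0⟩ := hz
    obtain ⟨i, hi, rfl⟩ := List.getElem_of_mem hr
    obtain ⟨j, hj, rfl⟩ := List.getElem_of_mem hzr
    have hbl : b.length = m.toNat := hd.1
    have hrl : b[i].length = n.toNat := hd.2 _ (List.getElem_mem hi)
    refine ⟨((i : Int), (j : Int)), ⟨by omega, by omega, by omega, by omega⟩, ?_⟩
    rw [getCell_nn _ _ _ (by omega) (by omega)]
    simp only [Int.toNat_natCast]
    rw [List.getD_eq_getElem _ _ hi, List.getD_eq_getElem _ _ (by omega)]
    simpa using hz0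
  · rintro ⟨c, ⟨h1, h2, h3, h4⟩, hc⟩
    have hbl : b.length = m.toNat := hd.1
    have hi : c.1.toNat < b.length := by omega
    have hrl : (b.getD c.1.toNat []).length = n.toNat := hd.2 _ (by
      rw [List.getD_eq_getElem _ _ hi]; exact List.getElem_mem hi)
    have hj : c.2.toNat < (b.getD c.1.toNat []).length := by omega
    refine ⟨b.getD c.1.toNat [], by rw [List.getD_eq_getElem _ _ hi]; exact List.getElem_mem hi, ?_⟩
    rw [List.any_eq_true]
    refine ⟨(b.getD c.1.toNat []).getD c.2.toNat 1, by
      rw [List.getD_eq_getElem _ _ hj]; exact List.getElem_mem hj, ?_⟩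
    rw [getCell_nn _ _ _ h1 h3] at hc
    simpa using hc

theorem foldl_max_spec (t : List Int) : ∀ a : Int,
    (t.foldl max a = a ∨ t.foldl max a ∈ t) ∧ a ≤ t.foldl max a ∧
      ∀ x ∈ t, x ≤ t.foldl max a := by
  induction t with
  | nil => intro a; simp
  | cons b t ih =>
    intro a
    simp only [List.foldl_cons, List.mem_cons]
    obtain ⟨h1, h2, h3⟩ := ih (max a b)
    refine ⟨?_, ?_, ?_⟩
    · rcases h1 with h | h
      · rcases max_choice a b with hm | hm
        · left; rw [h, hm]
        · right; left; rw [h, hm]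
      · right; right; exact h
    · calc a ≤ max a b := le_max_left a b
        _ ≤ t.foldl max (max a b) := h2
    · rintro x (rfl | hx)
      · calc x ≤ max a x := le_max_right a x
          _ ≤ t.foldl max (max a x) := h2
      · exact h3 x hx

theorem listMax_mem (l : List Int) (h : l ≠ []) : listMax l ∈ l := by
  match l with
  | a :: t =>
    rw [listMax]
    rcases (foldl_max_spec t a).1 with h' | h'
    · rw [h']; simp
    · simp [h']

theorem listMax_ub (l : List Int) (x : Int) (hx : x ∈ l) : x ≤ listMax l := by
  match l with
  | a :: t =>
    rw [listMax]
    rcases List.mem_cons.1 hx with rfl | h'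
    · exact (foldl_max_spec t x).2.1
    · exact (foldl_max_spec t a).2.2 x h'

theorem maxBoard_eq (m n v : Int) (b : List (List Int)) (hd : dimsP m n b)
    (hm : 0 < m.toNat) (hn : 0 < n.toNat)
    (hub : ∀ c, InR m n c → pvGetCell b c.1 c.2 ≤ v)
    (hex : ∃ c, InR m n c ∧ pvGetCell b c.1 c.2 = v) :
    listMax (b.map listMax) = v := by
  have hbne : b ≠ [] := by
    intro h
    have := hd.1
    rw [h] at this
    simp at this
    omega
  have hcell : ∀ i j (hi : i < b.length) (hj : j < b[i].length), b[i][j] ≤ v := by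
    intro i j hi hj
    have hrl : b[i].length = n.toNat := hd.2 _ (List.getElem_mem hi)
    have := hub ((i : Int), (j : Int)) ⟨by omega, by have := hd.1; omega, by omega, by omega⟩
    rw [getCell_nn _ _ _ (by omega) (by omega)] at this
    simp only [Int.toNat_natCast] at this
    rwa [List.getD_eq_getElem _ _ hi, List.getD_eq_getElem _ _ (by omega)] at this
  apply le_antisymm
  · have hmem := listMax_mem (b.map listMax) (by simpa using hbne)
    obtain ⟨r, hr, hrmax⟩ := List.mem_map.1 hmem
    obtain ⟨i, hi, rfl⟩ := List.getElem_of_mem hr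
    have hrl : b[i].length = n.toNat := hd.2 _ (List.getElem_mem hi)
    have hrne : b[i] ≠ [] := by
      intro h; rw [h] at hrl; simp at hrl; omega
    have hmem2 := listMax_mem b[i] hrne
    obtain ⟨j, hj, hjeq⟩ := List.getElem_of_mem hmem2
    rw [← hrmax, ← hjeq]
    exact hcell i j hi hj
  · obtain ⟨c, ⟨h1, h2, h3, h4⟩, hc⟩ := hex
    have hi : c.1.toNat < b.length := by have := hd.1; omega
    have hrl : (b.getD c.1.toNat []).length = n.toNat := hd.2 _ (by
      rw [List.getD_eq_getElem _ _ hi]; exact List.getElem_mem hi)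
    have hj : c.2.toNat < (b.getD c.1.toNat []).length := by omega
    rw [getCell_nn _ _ _ h1 h3] at hc
    have hv1 : v ≤ listMax (b.getD c.1.toNat []) := by
      rw [← hc]
      exact listMax_ub _ _ (by rw [List.getD_eq_getElem _ _ hj]; exact List.getElem_mem hj)
    refine le_trans hv1 (listMax_ub _ _ ?_)
    exact List.mem_map.2 ⟨_, by rw [List.getD_eq_getElem _ _ hi]; exact List.getElem_mem hi, rfl⟩

-- accumulator irrelevance for the neighbour folds
theorem fold_acc {α : Type}
    (f : (List (List Int) × List (Int × Int)) → α → (List (List Int) × List (Int × Int)))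
    (hf : ∀ b acc w, (f (b, acc) w).1 = (f (b, []) w).1 ∧
      (f (b, acc) w).2 = acc ++ (f (b, []) w).2) (ws : List α) :
    ∀ b acc, List.foldl f (b, acc) ws
      = ((List.foldl f (b, []) ws).1, acc ++ (List.foldl f (b, []) ws).2) := by
  induction ws with
  | nil => intro b acc; simp
  | cons w ws ih =>
    intro b acc
    simp only [List.foldl_cons]
    have h1 : f (b, acc) w = ((f (b, []) w).1, acc ++ (f (b, []) w).2) := by
      have := hf b acc w
      exact Prod.ext this.1 this.2
    have h2 : f (b, []) w = ((f (b, []) w).1, (f (b, []) w).2) := rfl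
    rw [h1, ih _ (acc ++ (f (b, []) w).2)]
    conv_rhs => rw [h2, ih _ (f (b, []) w).2]
    simp [List.append_assoc]

theorem wayStepA_acc (m n x y : Int) : ∀ b acc w,
    (wayStepA m n x y (b, acc) w).1 = (wayStepA m n x y (b, []) w).1 ∧
    (wayStepA m n x y (b, acc) w).2 = acc ++ (wayStepA m n x y (b, []) w).2 := by
  intro b acc w
  rw [wayStepA, wayStepA]
  split <;> simp

-- A's counterpart of expandB, used only in the proofs
def expandA (m n : Int) (b : List (List Int)) (F : List (Int × Int)) :
    List (List Int) × List (Int × Int) :=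
  List.foldl (fun s c => List.foldl (wayStepA m n c.1 c.2) s pvWays) (b, []) F

theorem cellStepA_acc (m n : Int) (c : Int × Int) : ∀ b acc,
    List.foldl (wayStepA m n c.1 c.2) (b, acc) pvWays
      = ((List.foldl (wayStepA m n c.1 c.2) (b, []) pvWays).1,
          acc ++ (List.foldl (wayStepA m n c.1 c.2) (b, []) pvWays).2) :=
  fun b acc => fold_acc _ (wayStepA_acc m n c.1 c.2) pvWays b acc

theorem expandA_zeros (m n : Int) (b : List (List Int)) (F : List (Int × Int)) :
    pvZeros (expandA m n b F).1 + (expandA m n b F).2.length = pvZeros b := by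
  simpa [expandA] using zeros_fold (fun s c => List.foldl (wayStepA m n c.1 c.2) s pvWays)
    (fun s c => zeros_fold (wayStepA m n c.1 c.2) (wayStepA_zeros m n c.1 c.2) pvWays s) F (b, [])

theorem expandA_cons (m n : Int) (b : List (List Int)) (c : Int × Int) (F : List (Int × Int)) :
    expandA m n b (c :: F)
      = ((expandA m n (List.foldl (wayStepA m n c.1 c.2) (b, []) pvWays).1 F).1,
          (List.foldl (wayStepA m n c.1 c.2) (b, []) pvWays).2
            ++ (expandA m n (List.foldl (wayStepA m n c.1 c.2) (b, []) pvWays).1 F).2) := by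
  rw [expandA, List.foldl_cons]
  have h : List.foldl (wayStepA m n c.1 c.2) (b, []) pvWays
      = ((List.foldl (wayStepA m n c.1 c.2) (b, []) pvWays).1,
          (List.foldl (wayStepA m n c.1 c.2) (b, []) pvWays).2) := rfl
  rw [h]
  rw [fold_acc (fun s c => List.foldl (wayStepA m n c.1 c.2) s pvWays)
    (fun b acc w => by
      have := cellStepA_acc m n w b acc
      have h2 := cellStepA_acc m n w b []
      dsimp only
      rw [this, h2]
      simp) F]
  rfl

-- A's queue run decomposes level by level
theorem loopA_expand (m n : Int) : ∀ (F G : List (Int × Int)) (b : List (List Int)),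
    loopA m n b (F ++ G) = loopA m n (expandA m n b F).1 (G ++ (expandA m n b F).2) := by
  intro F
  induction F with
  | nil => intro G b; simp [expandA]
  | cons c F ih =>
    intro G b
    rw [List.cons_append, loopA]
    have hs : List.foldl (wayStepA m n c.1 c.2) (b, []) pvWays
        = ((List.foldl (wayStepA m n c.1 c.2) (b, []) pvWays).1,
            (List.foldl (wayStepA m n c.1 c.2) (b, []) pvWays).2) := rfl
    rw [List.append_assoc]
    rw [ih (G ++ (List.foldl (wayStepA m n c.1 c.2) (b, []) pvWays).2) _]
    rw [expandA_cons]
    simp [List.append_assoc]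

-- simulation invariant while expanding one BFS level (b0 = board at level entry, d = current depth)
def RelAB (m n d : Int) (b0 bA bB : List (List Int)) (NA NB : List (Int × Int)) : Prop :=
  NA = NB ∧ dimsP m n bA ∧ dimsP m n bB ∧ ZEq m n bA bB ∧
  (∀ c ∈ NA, InR m n c ∧ pvGetCell bA c.1 c.2 = d + 2 ∧ pvGetCell b0 c.1 c.2 = 0) ∧
  (∀ c, InR m n c → pvGetCell bA c.1 c.2 = pvGetCell b0 c.1 c.2 ∨ c ∈ NA) ∧
  (∀ c, InR m n c → pvGetCell bA c.1 c.2 ≤ d + 2)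

theorem Rel_way (m n d : Int) (b0 : List (List Int)) (x y cx cy : Int) (w : Int × Int)
    (hd : 0 ≤ d) (hcI : InR m n (cx, cy))
    (hread : ∀ b, dimsP m n b → pvGetCell b x y = pvGetCell b cx cy)
    (hv0 : pvGetCell b0 cx cy = d + 1)
    (sA sB : List (List Int) × List (Int × Int))
    (h : RelAB m n d b0 sA.1 sB.1 sA.2 sB.2) :
    RelAB m n d b0 (wayStepA m n x y sA w).1 (wayStepB m n x y sB w).1
      (wayStepA m n x y sA w).2 (wayStepB m n x y sB w).2 := by
  obtain ⟨hN, hdA, hdB, hz, hNA, hch, hub⟩ := h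
  have hvA : pvGetCell sA.1 x y = d + 1 := by
    rw [hread sA.1 hdA]
    rcases hch (cx, cy) hcI with h' | h'
    · rw [h']; exact hv0
    · have := (hNA _ h').2.2
      simp only at this
      omega
  by_cases hg : 0 ≤ x + w.1 ∧ x + w.1 < m ∧ 0 ≤ y + w.2 ∧ y + w.2 < n ∧
      pvGetCell sB.1 (x + w.1) (y + w.2) = 0
  · have hInRn : InR m n (x + w.1, y + w.2) := ⟨hg.1, hg.2.1, hg.2.2.1, hg.2.2.2.1⟩
    have hA0 : pvGetCell sA.1 (x + w.1) (y + w.2) = 0 := (hz _ hInRn).2 hg.2.2.2.2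
    have hgA : 0 ≤ x + w.1 ∧ x + w.1 < m ∧ 0 ≤ y + w.2 ∧ y + w.2 < n ∧
        1 ≤ pvGetCell sA.1 x y ∧ pvGetCell sA.1 (x + w.1) (y + w.2) = 0 :=
      ⟨hg.1, hg.2.1, hg.2.2.1, hg.2.2.2.1, by omega, hA0⟩
    rw [wayStepA, wayStepB, if_pos hgA, if_pos hg]
    dsimp only
    have hnewA : pvGetCell (pvSetCell sA.1 (x + w.1) (y + w.2) (pvGetCell sA.1 x y + 1))
        (x + w.1) (y + w.2) = d + 2 := by
      rw [getCell_set_self m n _ _ _ _ hdA hInRn, hvA]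
      omega
    have hsetA : ∀ c : Int × Int, InR m n c → c ≠ (x + w.1, y + w.2) →
        pvGetCell (pvSetCell sA.1 (x + w.1) (y + w.2) (pvGetCell sA.1 x y + 1)) c.1 c.2
          = pvGetCell sA.1 c.1 c.2 := by
      intro c hc hne
      exact getCell_set_ne _ _ _ _ _ _ hInRn.1 hInRn.2.2.1 hc.1 hc.2.2.1 (fun he => hne he.symm)
    have hsetB : ∀ c : Int × Int, InR m n c → c ≠ (x + w.1, y + w.2) →
        pvGetCell (pvSetCell sB.1 (x + w.1) (y + w.2) 1) c.1 c.2 = pvGetCell sB.1 c.1 c.2 := by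
      intro c hc hne
      exact getCell_set_ne _ _ _ _ _ _ hInRn.1 hInRn.2.2.1 hc.1 hc.2.2.1 (fun he => hne he.symm)
    have hnewB : pvGetCell (pvSetCell sB.1 (x + w.1) (y + w.2) 1) (x + w.1) (y + w.2) = 1 :=
      getCell_set_self m n _ _ _ _ hdB hInRn
    refine ⟨by rw [hN], dims_set m n _ _ _ _ hdA, dims_set m n _ _ _ _ hdB, ?_, ?_, ?_, ?_⟩
    · intro c hc
      by_cases he : c = (x + w.1, y + w.2)
      · subst he
        rw [hnewA, hnewB]
        constructor <;> intro h' <;> omega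
      · rw [hsetA c hc he, hsetB c hc he]
        exact hz c hc
    · intro c hc
      rcases List.mem_append.1 hc with hco | hcn
      · obtain ⟨hcI, hcv, hcb⟩ := hNA c hco
        have hne : c ≠ (x + w.1, y + w.2) := by
          intro he; rw [he] at hcv; rw [hA0] at hcv; omega
        exact ⟨hcI, by rw [hsetA c hcI hne]; exact hcv, hcb⟩
      · have he : c = (x + w.1, y + w.2) := by simpa using hcn
        subst he
        refine ⟨hInRn, hnewA, ?_⟩
        rcases hch _ hInRn with h' | h'
        · rw [← h']; exact hA0
        · have := (hNA _ h').2.1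
          rw [hA0] at this
          omega
    · intro c hc
      by_cases he : c = (x + w.1, y + w.2)
      · subst he
        right
        simp
      · rw [hsetA c hc he]
        rcases hch c hc with h' | h'
        · left; exact h'
        · right; exact List.mem_append.2 (Or.inl h')
    · intro c hc
      by_cases he : c = (x + w.1, y + w.2)
      · subst he; rw [hnewA]
      · rw [hsetA c hc he]; exact hub c hc
  · have hgA : ¬(0 ≤ x + w.1 ∧ x + w.1 < m ∧ 0 ≤ y + w.2 ∧ y + w.2 < n ∧
        1 ≤ pvGetCell sA.1 x y ∧ pvGetCell sA.1 (x + w.1) (y + w.2) = 0) := by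
      intro hga
      exact hg ⟨hga.1, hga.2.1, hga.2.2.1, hga.2.2.2.1,
        (hz (x + w.1, y + w.2) ⟨hga.1, hga.2.1, hga.2.2.1, hga.2.2.2.1⟩).1 hga.2.2.2.2.2⟩
    rw [wayStepA, wayStepB, if_neg hgA, if_neg hg]
    exact ⟨hN, hdA, hdB, hz, hNA, hch, hub⟩

theorem Rel_ways (m n d : Int) (b0 : List (List Int)) (x y cx cy : Int)
    (hd : 0 ≤ d) (hcI : InR m n (cx, cy))
    (hread : ∀ b, dimsP m n b → pvGetCell b x y = pvGetCell b cx cy)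
    (hv0 : pvGetCell b0 cx cy = d + 1) :
    ∀ (ws : List (Int × Int)) (sA sB : List (List Int) × List (Int × Int)),
    RelAB m n d b0 sA.1 sB.1 sA.2 sB.2 →
    RelAB m n d b0 (List.foldl (wayStepA m n x y) sA ws).1 (List.foldl (wayStepB m n x y) sB ws).1
      (List.foldl (wayStepA m n x y) sA ws).2 (List.foldl (wayStepB m n x y) sB ws).2 := by
  intro ws
  induction ws with
  | nil => intro sA sB h; simpa
  | cons w ws ih =>
    intro sA sB h
    simp only [List.foldl_cons]
    exact ih _ _ (Rel_way m n d b0 x y cx cy w hd hcI hread hv0 sA sB h)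

theorem Rel_cells (m n d : Int) (b0 : List (List Int)) (hd : 0 ≤ d) :
    ∀ (F : List (Int × Int)) (sA sB : List (List Int) × List (Int × Int)),
    RelAB m n d b0 sA.1 sB.1 sA.2 sB.2 →
    (∀ c ∈ F, ∃ c', InR m n c' ∧ (∀ b, dimsP m n b →
      pvGetCell b c.1 c.2 = pvGetCell b c'.1 c'.2) ∧ pvGetCell b0 c'.1 c'.2 = d + 1) →
    RelAB m n d b0
      (List.foldl (fun s c => List.foldl (wayStepA m n c.1 c.2) s pvWays) sA F).1
      (List.foldl (fun s c => List.foldl (wayStepB m n c.1 c.2) s pvWays) sB F).1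
      (List.foldl (fun s c => List.foldl (wayStepA m n c.1 c.2) s pvWays) sA F).2
      (List.foldl (fun s c => List.foldl (wayStepB m n c.1 c.2) s pvWays) sB F).2 := by
  intro F
  induction F with
  | nil => intro sA sB h _; simpa
  | cons c F ih =>
    intro sA sB h hF
    simp only [List.foldl_cons]
    obtain ⟨c', hcI, hread, hv0⟩ := hF c (by simp)
    have hc1 : InR m n (c'.1, c'.2) := by simpa using hcI
    exact ih _ _ (Rel_ways m n d b0 c.1 c.2 c'.1 c'.2 hd hc1 hread hv0 pvWays sA sB h)
      (fun q hq => hF q (by simp [hq]))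

theorem loopA_nil (m n : Int) (b : List (List Int)) : loopA m n b [] = b := by
  rw [loopA]

theorem loopB_eq (m n : Int) (b : List (List Int)) (F : List (Int × Int)) (d : Int) :
    loopB m n b F d = if (expandB m n b F).2 = [] then ((expandB m n b F).1, d)
      else loopB m n (expandB m n b F).1 (expandB m n b F).2 (d + 1) := by
  rw [loopB]

theorem SIM_nil (m n : Int) (bA bB : List (List Int)) (F : List (Int × Int)) (d : Int)
    (hd : 0 ≤ d)
    (hdA : dimsP m n bA) (hdB : dimsP m n bB) (hz : ZEq m n bA bB)
    (hFr : ∀ c ∈ F, ∃ c', InR m n c' ∧ (∀ b, dimsP m n b →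
      pvGetCell b c.1 c.2 = pvGetCell b c'.1 c'.2) ∧ pvGetCell bA c'.1 c'.2 = d + 1)
    (hub : ∀ c, InR m n c → pvGetCell bA c.1 c.2 ≤ d + 1)
    (hex : ∃ c, InR m n c ∧ pvGetCell bA c.1 c.2 = d + 1)
    (hnil : (expandA m n bA F).2 = []) :
    dimsP m n (loopA m n bA F) ∧ dimsP m n (loopB m n bB F d).1 ∧
    ZEq m n (loopA m n bA F) (loopB m n bB F d).1 ∧
    (∀ c, InR m n c → pvGetCell (loopA m n bA F) c.1 c.2 ≤ (loopB m n bB F d).2 + 1) ∧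
    (∃ c, InR m n c ∧ pvGetCell (loopA m n bA F) c.1 c.2 = (loopB m n bB F d).2 + 1) := by
  obtain ⟨hN, hdA', hdB', hz', hNA', hch', hub'⟩ :=
    Rel_cells m n d bA hd F (bA, []) (bB, [])
      ⟨rfl, hdA, hdB, hz, by simp, fun c _ => Or.inl rfl, fun c hc => by
        dsimp only; have := hub c hc; omega⟩ hFr
  have HN : (expandA m n bA F).2 = (expandB m n bB F).2 := hN
  have HdA : dimsP m n (expandA m n bA F).1 := hdA'
  have HdB : dimsP m n (expandB m n bB F).1 := hdB'
  have Hz : ZEq m n (expandA m n bA F).1 (expandB m n bB F).1 := hz'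
  have Hch : ∀ c, InR m n c → pvGetCell (expandA m n bA F).1 c.1 c.2 = pvGetCell bA c.1 c.2 ∨
      c ∈ (expandA m n bA F).2 := hch'
  have hLA : loopA m n bA F = (expandA m n bA F).1 := by
    have h1 := loopA_expand m n F [] bA
    simpa [loopA_nil, hnil] using h1
  have hLB : loopB m n bB F d = ((expandB m n bB F).1, d) := by
    rw [loopB_eq, if_pos (by rw [← HN]; exact hnil)]
  rw [hLA, hLB]
  refine ⟨HdA, HdB, Hz, ?_, ?_⟩
  · intro c hc
    dsimp only
    rcases Hch c hc with h' | h'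
    · rw [h']; exact hub c hc
    · rw [hnil] at h'; simp at h'
  · obtain ⟨c, hcI, hcv⟩ := hex
    rcases Hch c hcI with h' | h'
    · exact ⟨c, hcI, by dsimp only; rw [h']; exact hcv⟩
    · rw [hnil] at h'; simp at h'

theorem SIM (m n : Int) : ∀ (k : Nat) (bA bB : List (List Int)) (F : List (Int × Int)) (d : Int),
    pvZeros bA ≤ k → 0 ≤ d → F ≠ [] →
    dimsP m n bA → dimsP m n bB → ZEq m n bA bB →
    (∀ c ∈ F, ∃ c', InR m n c' ∧ (∀ b, dimsP m n b →
      pvGetCell b c.1 c.2 = pvGetCell b c'.1 c'.2) ∧ pvGetCell bA c'.1 c'.2 = d + 1) →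
    (∀ c, InR m n c → pvGetCell bA c.1 c.2 ≤ d + 1) →
    (∃ c, InR m n c ∧ pvGetCell bA c.1 c.2 = d + 1) →
    dimsP m n (loopA m n bA F) ∧ dimsP m n (loopB m n bB F d).1 ∧
    ZEq m n (loopA m n bA F) (loopB m n bB F d).1 ∧
    (∀ c, InR m n c → pvGetCell (loopA m n bA F) c.1 c.2 ≤ (loopB m n bB F d).2 + 1) ∧
    (∃ c, InR m n c ∧ pvGetCell (loopA m n bA F) c.1 c.2 = (loopB m n bB F d).2 + 1) := by
  intro k
  induction k with
  | zero =>
    intro bA bB F d hk hd hF hdA hdB hz hFr hub hex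
    have hlen := expandA_zeros m n bA F
    by_cases hnil : (expandA m n bA F).2 = []
    · exact SIM_nil m n bA bB F d hd hdA hdB hz hFr hub hex hnil
    · exfalso
      have : (expandA m n bA F).2.length ≠ 0 := fun h => hnil (List.eq_nil_of_length_eq_zero h)
      omega
  | succ k ih =>
    intro bA bB F d hk hd hF hdA hdB hz hFr hub hex
    have hlen := expandA_zeros m n bA F
    by_cases hnil : (expandA m n bA F).2 = []
    · exact SIM_nil m n bA bB F d hd hdA hdB hz hFr hub hex hnil
    · obtain ⟨hN, hdA', hdB', hz', hNA', hch', hub'⟩ :=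
        Rel_cells m n d bA hd F (bA, []) (bB, [])
          ⟨rfl, hdA, hdB, hz, by simp, fun c _ => Or.inl rfl, fun c hc => by
            dsimp only; have := hub c hc; omega⟩ hFr
      have HN : (expandA m n bA F).2 = (expandB m n bB F).2 := hN
      have HdA : dimsP m n (expandA m n bA F).1 := hdA'
      have HdB : dimsP m n (expandB m n bB F).1 := hdB'
      have Hz : ZEq m n (expandA m n bA F).1 (expandB m n bB F).1 := hz'
      have HNA : ∀ c ∈ (expandA m n bA F).2, InR m n c ∧
          pvGetCell (expandA m n bA F).1 c.1 c.2 = d + 2 ∧ pvGetCell bA c.1 c.2 = 0 := hNA'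
      have Hub : ∀ c, InR m n c → pvGetCell (expandA m n bA F).1 c.1 c.2 ≤ d + 2 := hub'
      have hLA : loopA m n bA F = loopA m n (expandA m n bA F).1 (expandA m n bA F).2 := by
        have h1 := loopA_expand m n F [] bA
        simpa using h1
      have hLB : loopB m n bB F d
          = loopB m n (expandB m n bB F).1 (expandB m n bB F).2 (d + 1) := by
        rw [loopB_eq, if_neg (by rw [← HN]; exact hnil)]
      have hlp : 0 < (expandA m n bA F).2.length := List.length_pos_of_ne_nil hnil
      have hkn : pvZeros (expandA m n bA F).1 ≤ k := by omega
      have hres := ih (expandA m n bA F).1 (expandB m n bB F).1 (expandA m n bA F).2 (d + 1)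
        hkn (by omega) hnil HdA HdB Hz
        (fun c hc => ⟨c, (HNA c hc).1, fun b _ => rfl, by rw [(HNA c hc).2.1]; ring⟩)
        (fun c hc => by have := Hub c hc; omega)
        (by
          obtain ⟨c, hc⟩ := List.exists_mem_of_ne_nil _ hnil
          exact ⟨c, (HNA c hc).1, by rw [(HNA c hc).2.1]; ring⟩)
      rw [hLA, hLB, ← HN]
      exact hres

theorem all_not_any (l : List (List Int)) :
    (l.all (fun r => !(r.any (fun z => z == 0)))) = !(l.any (fun r => r.any (fun z => z == 0))) := by
  induction l with
  | nil => simp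
  | cons r t ih => simp_all

theorem main_branch (m n : Int) (infests : List (Int × Int)) (b0 : List (List Int))
    (hdims0 : dimsP m n b0) (hz0 : pvHasZero b0 = true)
    (hub0 : ∀ c, InR m n c → pvGetCell b0 c.1 c.2 ≤ 0 + 1)
    (hFr : ∀ c ∈ infests.map (fun q => (q.1 - 1, q.2 - 1)),
      ∃ c', InR m n c' ∧ (∀ b, dimsP m n b →
        pvGetCell b c.1 c.2 = pvGetCell b c'.1 c'.2) ∧ pvGetCell b0 c'.1 c'.2 = 0 + 1) :
    (if pvHasZero (loopA m n b0 (infests.map (fun p => (p.1 - 1, p.2 - 1)))) = true then -1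
      else listMax (List.map listMax
        (loopA m n b0 (infests.map (fun p => (p.1 - 1, p.2 - 1))))) - 1)
    = (if pvHasZero (loopB m n b0 (infests.map (fun p => (p.1 - 1, p.2 - 1))) 0).1 = true
        then (-1 : Int)
        else (loopB m n b0 (infests.map (fun p => (p.1 - 1, p.2 - 1))) 0).2) := by
  cases infests with
  | nil =>
    simp only [List.map_nil]
    have hB : loopB m n b0 [] 0 = (b0, 0) := by
      rw [loopB_eq]
      simp [expandB]
    rw [loopA_nil, hB, if_pos hz0]
    dsimp only
    rw [if_pos hz0]
  | cons p rest =>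
    obtain ⟨cw, hcwI, hcwread, hcwv⟩ := hFr (p.1 - 1, p.2 - 1) (by simp)
    have hex0 : ∃ c, InR m n c ∧ pvGetCell b0 c.1 c.2 = 0 + 1 := ⟨cw, hcwI, hcwv⟩
    obtain ⟨hdA, hdB, hzf, hubf, hexf⟩ := SIM m n (pvZeros b0) b0 b0
      ((p :: rest).map (fun q => (q.1 - 1, q.2 - 1))) 0 (le_refl _) (by omega)
      (by simp) hdims0 hdims0 (fun c _ => Iff.rfl) hFr hub0 hex0
    have hmn : 0 < m.toNat ∧ 0 < n.toNat := by
      obtain ⟨c, hcI, _⟩ := hex0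
      obtain ⟨a1, a2, a3, a4⟩ := hcI
      omega
    have hzeq : pvHasZero (loopA m n b0 ((p :: rest).map (fun q => (q.1 - 1, q.2 - 1))))
        = pvHasZero (loopB m n b0 ((p :: rest).map (fun q => (q.1 - 1, q.2 - 1))) 0).1 := by
      rw [Bool.eq_iff_iff, hasZero_iff m n _ hdA, hasZero_iff m n _ hdB]
      constructor
      · rintro ⟨c, hc, h0⟩; exact ⟨c, hc, (hzf c hc).1 h0⟩
      · rintro ⟨c, hc, h0⟩; exact ⟨c, hc, (hzf c hc).2 h0⟩
    by_cases hzf0 : pvHasZero (loopA m n b0 ((p :: rest).map (fun q => (q.1 - 1, q.2 - 1)))) = true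
    · rw [if_pos hzf0, if_pos (by rw [← hzeq]; exact hzf0)]
    · rw [if_neg hzf0, if_neg (by rw [← hzeq]; exact hzf0)]
      have hmax := maxBoard_eq m n
        ((loopB m n b0 ((p :: rest).map (fun q => (q.1 - 1, q.2 - 1))) 0).2 + 1)
        _ hdA hmn.1 hmn.2 hubf hexf
      rw [hmax]
      ring

-- ===== VERDICT (by name: the statement is the Claim_ definition above) =====
theorem solution_spec : Claim_equal_solution := by
  intro m n infests vaccinateds hdom hpre
  unfold Spec_solution
  obtain ⟨hpi, hpv⟩ := hpre
  rw [solution, solution_alt]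
  have hdims0 : dimsP m n (pvPlace (pvPlace (pvMkBoard m n) vaccinateds (-1)) infests 1) :=
    dims_place m n _ infests 1 (dims_place m n _ vaccinateds (-1) (dims_mkBoard m n))
  have hall := all_not_any (pvPlace (pvPlace (pvMkBoard m n) vaccinateds (-1)) infests 1)
  rw [← pvHasZero] at hall
  by_cases hz0 : pvHasZero (pvPlace (pvPlace (pvMkBoard m n) vaccinateds (-1)) infests 1) = true
  · rw [if_pos hz0, hall, hz0]
    simp only [Bool.not_true, Bool.false_eq_true, if_false]
    obtain ⟨c0, hc0I, _⟩ := (hasZero_iff m n _ hdims0).1 hz0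
    have hm : 0 < m := by have h1 := hc0I.1; have h2 := hc0I.2.1; omega
    have hn : 0 < n := by have h1 := hc0I.2.2.1; have h2 := hc0I.2.2.2; omega
    have hv1 : pvPlace (pvMkBoard m n) vaccinateds (-1)
        = placeC (pvMkBoard m n) (vaccinateds.map (canonP m n)) (-1) :=
      place_canon m n (-1) hm hn vaccinateds _ (dims_mkBoard m n) hpv
    have hd1 : dimsP m n (placeC (pvMkBoard m n) (vaccinateds.map (canonP m n)) (-1)) :=
      dims_placeC m n _ _ _ (dims_mkBoard m n)
    have hv2 : pvPlace (pvPlace (pvMkBoard m n) vaccinateds (-1)) infests 1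
        = placeC (placeC (pvMkBoard m n) (vaccinateds.map (canonP m n)) (-1))
            (infests.map (canonP m n)) 1 := by
      rw [hv1]
      exact place_canon m n 1 hm hn infests _ hd1 hpi
    have hcanV : ∀ c ∈ vaccinateds.map (canonP m n), InR m n c := by
      intro c hc
      obtain ⟨q, hq, rfl⟩ := List.mem_map.1 hc
      exact canonP_InR m n q hm hn (hpv q hq)
    have hcanI : ∀ c ∈ infests.map (canonP m n), InR m n c := by
      intro c hc
      obtain ⟨q, hq, rfl⟩ := List.mem_map.1 hc
      exact canonP_InR m n q hm hn (hpi q hq)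
    have hub0 : ∀ c, InR m n c →
        pvGetCell (pvPlace (pvPlace (pvMkBoard m n) vaccinateds (-1)) infests 1) c.1 c.2
          ≤ 0 + 1 := by
      intro c hc
      rw [hv2]
      rcases placeC_or (placeC (pvMkBoard m n) (vaccinateds.map (canonP m n)) (-1))
        (infests.map (canonP m n)) 1 c.1 c.2
        (fun q hq => ⟨(hcanI q hq).1, (hcanI q hq).2.2.1⟩) hc.1 hc.2.2.1 with h1 | h1
      · omega
      · rcases placeC_or (pvMkBoard m n) (vaccinateds.map (canonP m n)) (-1) c.1 c.2
          (fun q hq => ⟨(hcanV q hq).1, (hcanV q hq).2.2.1⟩) hc.1 hc.2.2.1 with h2 | h2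
        · rw [h1, h2]; omega
        · rw [h1, h2, getCell_mkBoard m n c hc]; omega
    have hFr : ∀ c ∈ infests.map (fun q => (q.1 - 1, q.2 - 1)),
        ∃ c', InR m n c' ∧ (∀ b, dimsP m n b →
          pvGetCell b c.1 c.2 = pvGetCell b c'.1 c'.2) ∧
          pvGetCell (pvPlace (pvPlace (pvMkBoard m n) vaccinateds (-1)) infests 1) c'.1 c'.2
            = 0 + 1 := by
      intro c hc
      obtain ⟨q, hq, rfl⟩ := List.mem_map.1 hc
      have hqb := hpi q hq
      refine ⟨canonP m n q, canonP_InR m n q hm hn hqb, ?_, ?_⟩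
      · intro b hb
        simp only [canonP]
        exact getCell_canon m n b hb (q.1 - 1) (q.2 - 1) hm hn
          (by omega) (by omega) (by omega) (by omega)
      · rw [hv2]
        have := placeC_mem m n _ (infests.map (canonP m n)) 1 (canonP m n q) hd1 hcanI
          (List.mem_map.2 ⟨q, hq, rfl⟩)
        simpa using this
    exact main_branch m n infests _ hdims0 hz0 hub0 hFr
  · rw [if_neg hz0, hall]
    simp only [Bool.not_eq_true] at hz0
    rw [hz0]
    simp
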